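-- pv_equiv track=rewrite | github.com/Bernishik/University_statistic | 2/stari.py | chastPopad
-- ===== SOURCE A (Python) =====
-- def chastPopad(xs,values):
--     result = [0 for i in range(len(xs))]
--     for val in values:
--         for x in enumerate(xs):
--             if val == x[1]:
--                 result[x[0]] = result[x[0]]+1
--                 break
--     return result
-- ===== SOURCE B (Python) =====
-- def chastPopad(xs, values):
--     cnt = {}
--     for v in values:
--         cnt[v] = cnt.get(v, 0) + 1
--     result = []
--     seen = set()
--     for x in xs:
--         if x in seen:
--             result.append(0)
--         else:
--             seen.add(x)
--             result.append(cnt.get(x, 0))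
--     return result
-- ===== Notes on version B (the rewrite author's own statement) =====
-- stated objective: faster
-- what changed: B counts values once into a dict and then builds the result in a single pass over xs, emitting count[x] at each first occurrence and 0 at repeats (seen-set), instead of A's per-value linear scan of xs that increments result cells.
import Mathlib
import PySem

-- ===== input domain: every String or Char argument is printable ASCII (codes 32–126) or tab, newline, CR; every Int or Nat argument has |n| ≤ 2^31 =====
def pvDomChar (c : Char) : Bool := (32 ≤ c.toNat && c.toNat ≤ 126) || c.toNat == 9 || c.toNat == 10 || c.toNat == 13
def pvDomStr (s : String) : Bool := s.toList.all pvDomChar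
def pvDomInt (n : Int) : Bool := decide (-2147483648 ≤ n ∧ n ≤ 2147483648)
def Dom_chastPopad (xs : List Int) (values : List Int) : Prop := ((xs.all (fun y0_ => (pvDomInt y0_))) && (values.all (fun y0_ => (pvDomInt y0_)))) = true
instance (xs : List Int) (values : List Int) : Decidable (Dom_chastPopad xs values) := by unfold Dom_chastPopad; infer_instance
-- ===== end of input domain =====

-- B counts `values` into a dict once, then builds the result in one pass over xs (count at each first occurrence, 0 at repeats), replacing A's per-value linear scan of xs: asymptotically faster (O(n+m) vs O(n*m)).


-- ===== PORT A =====
-- inner 'for x in enumerate(xs): if val == x[1]: result[x[0]] += 1; break'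
def chastPopadInner (val : Int) : List (Int × Int) → List Int → List Int
  | [], r => r
  | p :: rest, r =>
      if val == p.2 then PySem.List.pySetD r p.1 (PySem.List.pyGetD r p.1 0 + 1)
      else chastPopadInner val rest r

def chastPopad (xs : List Int) (values : List Int) : List Int :=
  let result := (PySem.List.pyRange 0 (xs.length : Int) 1).map (fun _ => (0 : Int))
  values.foldl (fun r val => chastPopadInner val (PySem.List.enumerate xs 0) r) result

-- ===== PORT B =====
-- cnt = {}; for v in values: cnt[v] = cnt.get(v, 0) + 1
-- result = []; seen = set(); for x in xs: append 0 if x in seen else cnt.get(x, 0)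
def chastPopad_alt (xs : List Int) (values : List Int) : List Int :=
  let cnt := values.foldl (fun d v => d.insert v (d.getD v 0 + 1)) PySem.Dict.empty
  (xs.foldl (fun (st : List Int × PySem.Set Int) x =>
      if PySem.Set.contains st.2 x then (st.1 ++ [(0 : Int)], st.2)
      else (st.1 ++ [cnt.getD x 0], PySem.Set.add st.2 x))
    ([], PySem.Set.empty)).1

-- ===== PRECONDITION & SPEC =====
def Spec_chastPopad (xs : List Int) (values : List Int) (out : List Int) : Prop := out = chastPopad_alt xs values
instance (xs : List Int) (values : List Int) (out : List Int) : Decidable (Spec_chastPopad xs values out) := by unfold Spec_chastPopad; infer_instance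

-- ===== CLAIM (what is proved, stated in full; the proofs are below) =====
def Claim_equal_chastPopad : Prop := ∀ (xs : List Int) (values : List Int), Dom_chastPopad xs values → Spec_chastPopad xs values (chastPopad xs values)

-- ===== LEMMAS AND PROOFS =====

-- A's inner break-loop is 'update at the first index of val in xs' (Nat index via PySem.List.index?)
theorem chastPopadInner_eq_index? (v : Int) (xs : List Int) (s : Nat) (r : List Int) :
    chastPopadInner v (PySem.List.enumerate xs (s : Int)) r =
      match PySem.List.index? xs v with
      | some k => r.set (s + k) (r.getD (s + k) 0 + 1)
      | none => r := by
  induction xs generalizing s r with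
  | nil => rfl
  | cons x t ih =>
      rw [PySem.List.enumerate_cons]
      simp only [chastPopadInner]
      by_cases h : v = x
      · subst h
        rw [PySem.List.index?_cons_self]
        simp [PySem.List.pySetD_natCast, PySem.List.pyGetD_natCast]
      · have hbe : (v == x) = false := by simpa using h
        have hx : x ≠ v := fun he => h he.symm
        rw [hbe, if_neg (by simp), PySem.List.index?_cons_of_ne t hx]
        have hcast : ((s : Int) + 1) = ((s + 1 : Nat) : Int) := by push_cast; ring
        rw [hcast, ih (s + 1) r]
        cases hk : PySem.List.index? t v with
        | none => simp
        | some k =>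
            simp only [Option.map_some]
            have he : s + 1 + k = s + (k + 1) := by omega
            rw [he]

-- the inner step never changes the length of result
theorem chastPopadInner_length (v : Int) (l : List (Int × Int)) (r : List Int) :
    (chastPopadInner v l r).length = r.length := by
  induction l generalizing r with
  | nil => rfl
  | cons p rest ih =>
      simp only [chastPopadInner]
      by_cases h : v == p.2
      · rw [if_pos h]; exact PySem.List.length_pySetD r p.1 _
      · rw [if_neg h]; exact ih r

theorem A_fold_length (xs values : List Int) (r : List Int) :
    (values.foldl (fun r val => chastPopadInner val (PySem.List.enumerate xs 0) r) r).length
      = r.length := by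
  induction values generalizing r with
  | nil => rfl
  | cons v vs ih =>
      simp only [List.foldl_cons]
      rw [ih, chastPopadInner_length]

-- the fold over values, elementwise: each cell i gains countP (index? xs · = some i)
theorem A_fold_getD (xs : List Int) (values : List Int) (r : List Int)
    (hr : r.length = xs.length) (i : Nat) :
    (values.foldl (fun r val => chastPopadInner val (PySem.List.enumerate xs 0) r) r).getD i 0 =
      r.getD i 0 + (values.countP (fun v => PySem.List.index? xs v == some i) : Int) := by
  induction values generalizing r with
  | nil => simp
  | cons v vs ih =>
      simp only [List.foldl_cons, List.countP_cons]
      have hstep : chastPopadInner v (PySem.List.enumerate xs 0) r =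
          match PySem.List.index? xs v with
          | some k => r.set (0 + k) (r.getD (0 + k) 0 + 1)
          | none => r := by
        simpa using chastPopadInner_eq_index? v xs 0 r
      rw [hstep]
      cases hk : PySem.List.index? xs v with
      | none =>
          rw [ih r hr]
          simp

      | some k =>
          obtain ⟨hklen, _, _⟩ := PySem.List.getElem_of_index?_eq_some hk
          have hkr : k < r.length := by omega
          rw [ih (r.set (0 + k) (r.getD (0 + k) 0 + 1)) (by simpa using hr)]
          simp only [Nat.zero_add] at *
          by_cases hik : i = k
          · subst hik
            have hg : (r.set i (r.getD i 0 + 1)).getD i 0 = r.getD i 0 + 1 := by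
              rw [List.getD_eq_getElem _ _ (by simpa using hkr),
                  List.getElem_set_self, List.getD_eq_getElem _ _ hkr]
            rw [hg]
            simp only [beq_self_eq_true, if_true]
            push_cast; ring
          · have hg : (r.set k (r.getD k 0 + 1)).getD i 0 = r.getD i 0 := by
              by_cases hlen : i < r.length
              · rw [List.getD_eq_getElem _ _ (by simpa using hlen),
                    List.getElem_set_ne (by omega), List.getD_eq_getElem _ _ hlen]
              · rw [List.getD_eq_default _ _ (by simpa using Nat.le_of_not_lt hlen),
                    List.getD_eq_default _ _ (Nat.le_of_not_lt hlen)]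
            have hb : ((PySem.List.index? xs v == some i)) = false := by
              rw [hk]; simpa using fun he => hik he.symm
            have hki : ((some k : Option Nat) == some i) = false := by
              simpa using fun he => hik he.symm
            rw [hg, hki]
            simp

-- B's seen/append loop, unrolled into a structural description
def pvBspec (cnt : PySem.Dict Int Int) : List Int → PySem.Set Int → List Int
  | [], _ => []
  | x :: t, s =>
      (if x ∈ s then (0 : Int) else cnt.getD x 0) :: pvBspec cnt t (PySem.Set.add s x)

theorem B_fold_eq_bspec (cnt : PySem.Dict Int Int) (xs : List Int) (acc : List Int) (s : PySem.Set Int) :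
    (xs.foldl (fun (st : List Int × PySem.Set Int) x =>
        if PySem.Set.contains st.2 x then (st.1 ++ [(0 : Int)], st.2)
        else (st.1 ++ [cnt.getD x 0], PySem.Set.add st.2 x)) (acc, s)).1 =
      acc ++ pvBspec cnt xs s := by
  induction xs generalizing acc s with
  | nil => simp [pvBspec]
  | cons x t ih =>
      simp only [List.foldl_cons, pvBspec]
      by_cases hm : x ∈ s
      · have hadd : PySem.Set.add s x = s := PySem.Set.add_of_mem hm
        rw [if_pos ((PySem.Set.contains_iff s x).mpr hm), ih, hadd, if_pos hm,
            List.append_assoc, List.singleton_append]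
      · rw [if_neg (by simp [hm]), ih, if_neg hm, List.append_assoc, List.singleton_append]

theorem bspec_length (cnt : PySem.Dict Int Int) (xs : List Int) (s : PySem.Set Int) :
    (pvBspec cnt xs s).length = xs.length := by
  induction xs generalizing s with
  | nil => rfl
  | cons x t ih => simp [pvBspec, ih]

theorem bspec_getD (cnt : PySem.Dict Int Int) (xs : List Int) (s : PySem.Set Int)
    (i : Nat) (hi : i < xs.length) :
    (pvBspec cnt xs s).getD i 0 =
      if xs[i] ∈ s ∨ xs[i] ∈ xs.take i then (0 : Int) else cnt.getD xs[i] 0 := by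
  induction xs generalizing s i with
  | nil => simp at hi
  | cons x t ih =>
      cases i with
      | zero =>
          simp [pvBspec]
      | succ j =>
          have hj : j < t.length := by simpa using hi
          simp only [pvBspec, List.getD_cons_succ, List.getElem_cons_succ,
            List.take_succ_cons, List.mem_cons]
          rw [ih (PySem.Set.add s x) j hj]
          have hmem : t[j] ∈ PySem.Set.add s x ↔ t[j] ∈ s ∨ t[j] = x :=
            PySem.Set.mem_add s x t[j]
          by_cases hc : t[j] ∈ PySem.Set.add s x ∨ t[j] ∈ t.take j
          · rw [if_pos hc, if_pos (by rw [hmem] at hc; tauto)]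
          · rw [if_neg hc, if_neg (by rw [hmem] at hc; tauto)]

-- first-occurrence characterisation: what A counts at cell i equals what B emits there
theorem countP_index?_eq (xs : List Int) (values : List Int) (i : Nat) (hi : i < xs.length) :
    (values.countP (fun v => PySem.List.index? xs v == some i) : Int) =
      if xs[i] ∈ xs.take i then (0 : Int) else (values.count xs[i] : Int) := by
  by_cases hfirst : xs[i] ∈ xs.take i
  · rw [if_pos hfirst]
    have hzero : values.countP (fun v => PySem.List.index? xs v == some i) = 0 := by
      apply List.countP_eq_zero.mpr
      intro v _
      simp only [beq_iff_eq]
      intro hidx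
      obtain ⟨hk, hval, hprev⟩ := PySem.List.getElem_of_index?_eq_some hidx
      obtain ⟨j, hj, hje⟩ := List.getElem_of_mem hfirst
      have hji : j < i := by
        have := hj; simp only [List.length_take] at this; omega
      refine hprev j hji ?_
      rw [← hval, ← hje, List.getElem_take]
    rw [hzero]; simp
  · rw [if_neg hfirst]
    have hself : PySem.List.index? xs xs[i] = some i := by
      rw [PySem.List.index?_eq_some_iff]
      refine ⟨xs.take i, xs.drop (i + 1), ?_, by simp only [List.length_take]; omega, hfirst⟩
      rw [List.getElem_cons_drop hi, List.take_append_drop]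
    have hpred : ∀ v, ((PySem.List.index? xs v == some i)) = (v == xs[i]) := by
      intro v
      by_cases hv : v = xs[i]
      · rw [hv, hself]; simp
      · have hne : PySem.List.index? xs v ≠ some i := by
          intro hidx
          obtain ⟨_, hval, _⟩ := PySem.List.getElem_of_index?_eq_some hidx
          exact hv hval.symm
        have h1 : (v == xs[i]) = false := by simpa using hv
        have h2 : ((PySem.List.index? xs v == some i)) = false := by
          simpa using hne
        rw [h1, h2]
    have hcc : values.countP (fun v => PySem.List.index? xs v == some i) =
        values.countP (fun v => v == xs[i]) := by
      apply List.countP_congr; intro v _; rw [hpred]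
    rw [hcc, List.count]

theorem chastPopad_eq (xs values : List Int) :
    chastPopad xs values = chastPopad_alt xs values := by
  unfold chastPopad chastPopad_alt
  simp only []
  rw [B_fold_eq_bspec, List.nil_append,
      PySem.Dict.foldl_insert_getD_add_one_eq_counter]
  have hinit : (PySem.List.pyRange 0 (xs.length : Int) 1).map (fun _ => (0 : Int)) =
      List.replicate xs.length (0 : Int) := by
    rw [List.eq_replicate_iff]
    refine ⟨by simp [PySem.List.length_pyRange_one], ?_⟩
    intro b hb
    rcases List.mem_map.mp hb with ⟨_, _, h⟩
    exact h.symm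
  rw [hinit]
  apply List.ext_getElem
  · rw [A_fold_length, bspec_length]; simp
  · intro i hi1 hi2
    have hi : i < xs.length := by
      rw [A_fold_length] at hi1; simpa using hi1
    rw [← List.getD_eq_getElem _ 0 hi1, ← List.getD_eq_getElem _ 0 hi2]
    rw [A_fold_getD xs values _ (by simp) i, bspec_getD _ _ _ i hi,
        countP_index?_eq xs values i hi, List.getD_replicate _ hi]
    by_cases hm : xs[i] ∈ xs.take i
    · simp [hm]
    · simp [hm, PySem.Dict.getD_counter]

-- ===== VERDICT (by name: the statement is the Claim_ definition above) =====
theorem chastPopad_spec : Claim_equal_chastPopad := by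
  intro xs values _
  exact chastPopad_eq xs values
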